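-- pv_equiv track=rewrite | github.com/simontonner/neural-quantum-tomo | experiments_phase/playground/training_kl_metric.py | _infer_basis_order
-- ===== SOURCE A (Python) =====
-- from typing import Any, Dict, Iterable, List, Optional, Tuple, Callable
--
-- def _sliding_window_bases(window: Tuple[str, ...], num_qubits: int,
--                           background: str = "Z") -> List[str]:
--     """Slide `window` over a `background` string, return codes as strings."""
--     w = list(window)
--     L = len(w)
--     if L == 0 or L > num_qubits:
--         return []
--     out = []
--     for i in range(0, num_qubits - L + 1):
--         b = [background] * num_qubits
--         b[i:i + L] = w
--         out.append("".join(b))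
--     return out
--
-- def _infer_basis_order(codes_sorted: List[str], nqubits: int) -> List[str]:
--     """
--     Canonical order (matching generator idea):
--       Z^N,
--       sliding 'XX' over Z,
--       sliding 'XY' over Z,
--       then any remaining codes in sorted order.
--     """
--     codes_set = set(codes_sorted)
--     order: List[str] = []
--
--     z_code = "Z" * nqubits
--     if z_code in codes_set:
--         order.append(z_code)
--
--     for w in [("X", "X"), ("X", "Y")]:
--         for b in _sliding_window_bases(w, nqubits, background="Z"):
--             if b in codes_set and b not in order:
--                 order.append(b)
--
--     for c in codes_sorted:
--         if c not in order:
--             order.append(c)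
--
--     return order
-- ===== SOURCE B (Python) =====
-- from typing import List, Tuple
--
-- def _sliding_window_bases(window: Tuple[str, ...], num_qubits: int,
--                           background: str = "Z") -> List[str]:
--     """Slide `window` over a `background` string, return codes as strings."""
--     w = list(window)
--     L = len(w)
--     if L == 0 or L > num_qubits:
--         return []
--     out = []
--     for i in range(0, num_qubits - L + 1):
--         b = [background] * num_qubits
--         b[i:i + L] = w
--         out.append("".join(b))
--     return out
--
-- def _infer_basis_order(codes_sorted: List[str], nqubits: int) -> List[str]:
--     priority = (["Z" * nqubits]
--                 + _sliding_window_bases(("X", "X"), nqubits, background="Z")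
--                 + _sliding_window_bases(("X", "Y"), nqubits, background="Z"))
--     rank = {}
--     for c in priority:
--         if c not in rank:
--             rank[c] = len(rank)
--     dedup = list(dict.fromkeys(codes_sorted))
--     return sorted(dedup, key=lambda c: rank.get(c, len(rank)))
-- ===== Notes on version B (the rewrite author's own statement) =====
-- stated objective: simpler
-- what changed: A's three membership-guarded scan loops building `order` incrementally are replaced by building a rank dict over the priority codes once, deduplicating the input, and doing a single stable sort keyed by rank (absent codes rank last, keeping their original order).
import Mathlib
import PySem

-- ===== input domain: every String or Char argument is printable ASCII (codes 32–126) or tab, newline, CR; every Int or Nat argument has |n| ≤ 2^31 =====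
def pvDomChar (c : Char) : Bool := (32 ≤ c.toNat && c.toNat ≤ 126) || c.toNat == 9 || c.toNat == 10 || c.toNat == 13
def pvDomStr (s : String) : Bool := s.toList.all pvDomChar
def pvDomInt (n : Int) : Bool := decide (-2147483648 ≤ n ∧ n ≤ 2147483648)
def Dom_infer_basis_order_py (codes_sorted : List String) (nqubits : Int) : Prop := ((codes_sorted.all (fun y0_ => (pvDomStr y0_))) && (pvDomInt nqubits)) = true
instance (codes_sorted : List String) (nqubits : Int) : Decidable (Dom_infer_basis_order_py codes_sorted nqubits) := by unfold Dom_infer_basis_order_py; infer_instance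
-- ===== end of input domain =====

-- B replaces A's three membership-guarded scan loops by a rank dict over the priority
-- codes plus one stable sort of the deduplicated input (objective: simpler).

-- ===== PORT A =====
-- shared helper: literal port of _sliding_window_bases (used verbatim by both A and B)
def pv_sliding_window_bases (window : List String) (num_qubits : Int) (background : String) : List String :=
  let w := window
  let L : Int := PySem.List.len w
  if L = 0 ∨ L > num_qubits then []
  else
    (PySem.List.pyRange 0 (num_qubits - L + 1) 1).foldl
      (fun out i =>
        -- b = [background] * num_qubits;  b[i:i+L] = w  (slice assignment; exact here
        -- since 0 ≤ i and i + L ≤ num_qubits for every i produced by the range)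
        let b := (PySem.List.pyRepeat [background] num_qubits).take i.toNat ++ w
                   ++ (PySem.List.pyRepeat [background] num_qubits).drop (i + L).toNat
        out ++ [PySem.Str.join "" b]) []

def infer_basis_order_py (codes_sorted : List String) (nqubits : Int) : List String :=
  let codes_set := PySem.Set.ofList codes_sorted
  -- z_code = "Z" * nqubits (string repetition, char-wise; empty for nqubits ≤ 0 as in Python)
  let z_code : String := String.ofList (PySem.List.pyRepeat ['Z'] nqubits)
  let order0 : List String := []
  let order1 := if PySem.Set.contains codes_set z_code then order0 ++ [z_code] else order0
  let order2 := [["X", "X"], ["X", "Y"]].foldl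
    (fun order w =>
      (pv_sliding_window_bases w nqubits "Z").foldl
        (fun order b =>
          if PySem.Set.contains codes_set b && !(order.contains b) then order ++ [b] else order)
        order)
    order1
  codes_sorted.foldl (fun order c => if !(order.contains c) then order ++ [c] else order) order2

-- ===== PORT B =====
def infer_basis_order_py_alt (codes_sorted : List String) (nqubits : Int) : List String :=
  let z_code : String := String.ofList (PySem.List.pyRepeat ['Z'] nqubits)
  let priority := [z_code] ++ pv_sliding_window_bases ["X", "X"] nqubits "Z"
                    ++ pv_sliding_window_bases ["X", "Y"] nqubits "Z"
  let rank : PySem.Dict String Int := priority.foldl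
    (fun rank c => if rank.contains c then rank else rank.insert c (rank.size : Int))
    PySem.Dict.empty
  let dd := PySem.List.dedup codes_sorted
  PySem.List.sorted dd (fun c => rank.getD c (rank.size : Int)) false

-- ===== PRECONDITION & SPEC =====
def Spec_infer_basis_order_py (codes_sorted : List String) (nqubits : Int) (out : List String) : Prop := out = infer_basis_order_py_alt codes_sorted nqubits
instance (codes_sorted : List String) (nqubits : Int) (out : List String) : Decidable (Spec_infer_basis_order_py codes_sorted nqubits out) := by unfold Spec_infer_basis_order_py; infer_instance

-- ===== CLAIM (what is proved, stated in full; the proofs are below) =====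
def Claim_equal_infer_basis_order_py : Prop := ∀ (codes_sorted : List String) (nqubits : Int), Dom_infer_basis_order_py codes_sorted nqubits → Spec_infer_basis_order_py codes_sorted nqubits (infer_basis_order_py codes_sorted nqubits)

-- ===== LEMMAS AND PROOFS =====

-- set(xs) over a snoc
theorem pv_ofList_snoc {α : Type} [BEq α] [LawfulBEq α] (l : List α) (a : α) :
    PySem.Set.ofList (l ++ [a])
      = if a ∈ l then PySem.Set.ofList l else PySem.Set.ofList l ++ [a] := by
  simp only [PySem.Set.ofList_eq_foldl, List.foldl_append, List.foldl_cons, List.foldl_nil]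
  rw [← PySem.Set.ofList_eq_foldl]
  by_cases h : a ∈ l
  · simp [PySem.Set.add, PySem.Set.contains, PySem.Set.mem_ofList, h]
  · simp [PySem.Set.add, PySem.Set.contains, PySem.Set.mem_ofList, h]

theorem pv_ofList_cons {α : Type} [BEq α] [LawfulBEq α] (a : α) (l : List α) :
    PySem.Set.ofList (a :: l) = a :: (PySem.Set.ofList l).filter (fun b => !(b == a)) := by
  induction l using List.reverseRecOn with
  | nil => simp [PySem.Set.ofList_eq_foldl, PySem.Set.add, PySem.Set.contains]
  | append_singleton l b ih =>
      rw [show a :: (l ++ [b]) = (a :: l) ++ [b] by simp, pv_ofList_snoc, pv_ofList_snoc]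
      by_cases hba : b = a
      · subst hba
        by_cases hal : b ∈ l
        · simp [hal, ih]
        · simp [hal, ih, List.filter_append]
      · by_cases hbl : b ∈ l
        · simp [hbl, hba, ih]
        · simp [hbl, hba, ih, List.filter_append]

theorem pv_ofList_filter {α : Type} [BEq α] [LawfulBEq α] (q : α → Bool) (l : List α) :
    PySem.Set.ofList (l.filter q) = (PySem.Set.ofList l).filter q := by
  induction l using List.reverseRecOn with
  | nil => simp
  | append_singleton l b ih =>
      rw [List.filter_append, pv_ofList_snoc]
      by_cases hq : q b
      · simp only [List.filter_cons, List.filter_nil, hq, if_pos]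
        rw [pv_ofList_snoc]
        by_cases hbl : b ∈ l.filter q
        · have hbl' : b ∈ l := (List.mem_filter.mp hbl).1
          simp [hbl, hbl', ih]
        · have h : ¬ b ∈ l := fun hh => hbl (List.mem_filter.mpr ⟨hh, hq⟩)
          simp [hbl, h, ih, List.filter_append, hq]
      · simp only [List.filter_cons, List.filter_nil]
        rw [if_neg (by simp [hq])]
        simp only [List.append_nil]
        by_cases hbl : b ∈ l
        · simp [hbl, ih]
        · simp [hbl, ih, List.filter_append, hq]

theorem pv_dedup_snoc {α : Type} [BEq α] [LawfulBEq α] (l : List α) (a : α) :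
    PySem.List.dedup (l ++ [a])
      = if a ∈ l then PySem.List.dedup l else PySem.List.dedup l ++ [a] := by
  simpa [PySem.List.dedup] using pv_ofList_snoc l a

theorem pv_dedup_cons {α : Type} [BEq α] [LawfulBEq α] (a : α) (l : List α) :
    PySem.List.dedup (a :: l) = a :: (PySem.List.dedup l).filter (fun b => !(b == a)) := by
  simpa [PySem.List.dedup] using pv_ofList_cons a l

theorem pv_dedup_filter {α : Type} [BEq α] [LawfulBEq α] (q : α → Bool) (l : List α) :
    PySem.List.dedup (l.filter q) = (PySem.List.dedup l).filter q := by
  simpa [PySem.List.dedup] using pv_ofList_filter q l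

-- on a duplicate-free list, filtering for one element yields it at most once
theorem pv_filter_eq_of_nodup {α : Type} [BEq α] [LawfulBEq α] {D : List α} (hD : D.Nodup)
    (a : α) : D.filter (fun c => c == a) = if a ∈ D then [a] else [] := by
  induction D with
  | nil => simp
  | cons x D ih =>
      rcases List.nodup_cons.mp hD with ⟨hx, hD'⟩
      by_cases hxa : x = a
      · subst hxa
        simp [ih hD', hx]
      · simp [hxa, ih hD', Ne.symm hxa]

-- A's guarded append loop, characterised
theorem pv_foldl_guard {α : Type} [BEq α] [LawfulBEq α] (p : α → Bool) (l o : List α) :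
    l.foldl (fun order b => if p b && !(order.contains b) then order ++ [b] else order) o
      = o ++ (PySem.List.dedup (l.filter p)).filter (fun b => !(o.contains b)) := by
  induction l using List.reverseRecOn with
  | nil => simp [PySem.List.dedup, PySem.Set.ofList_eq_foldl]
  | append_singleton l b ih =>
      rw [List.foldl_append, List.foldl_cons, List.foldl_nil, ih, List.filter_append]
      by_cases hp : p b
      · simp only [List.filter_cons, List.filter_nil, hp, if_pos]
        rw [pv_dedup_snoc]
        by_cases hbf : b ∈ l.filter p
        · have hmem : b ∈ o ++ (PySem.List.dedup (l.filter p)).filter (fun b => !(o.contains b)) := by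
            by_cases hbo : b ∈ o
            · exact List.mem_append_left _ hbo
            · refine List.mem_append_right _ ?_
              refine List.mem_filter.mpr ⟨?_, by simp [hbo]⟩
              simpa [PySem.List.mem_dedup] using hbf
          simp [hbf]
        · rw [if_neg hbf, List.filter_append]
          by_cases hbo : b ∈ o
          · have : b ∈ o ++ (PySem.List.dedup (l.filter p)).filter (fun b => !(o.contains b)) :=
              List.mem_append_left _ hbo
            simp [hbo]
          · have hnb : ¬ b ∈ o ++ (PySem.List.dedup (l.filter p)).filter (fun b => !(o.contains b)) := by
              intro h
              rcases List.mem_append.mp h with h | h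
              · exact hbo h
              · exact hbf (by simpa [PySem.List.mem_dedup] using (List.mem_filter.mp h).1)
            have hbl : ¬ b ∈ l := fun h => hbf (List.mem_filter.mpr ⟨h, hp⟩)
            simp [hbo, hbl]
      · simp [hp]

-- insertBy inserts between a false-block and a true-block
theorem pv_insertBy_middle {α : Type} (before : α → α → Bool) (x : α) :
    ∀ (l1 l2 : List α), (∀ y ∈ l1, before x y = false) → (∀ y ∈ l2, before x y = true) →
      PySem.List.insertBy before x (l1 ++ l2) = l1 ++ x :: l2 := by
  intro l1
  induction l1 with
  | nil =>
      intro l2 _ h2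
      cases l2 with
      | nil => simp [PySem.List.insertBy]
      | cons y ys => simp [PySem.List.insertBy, h2 y (by simp)]
  | cons z l1 ih =>
      intro l2 h1 h2
      have hz : before x z = false := h1 z (by simp)
      simp only [List.cons_append, PySem.List.insertBy, hz]
      simp [ih l2 (fun y hy => h1 y (by simp [hy])) h2]

-- stable sort = concatenation of key-blocks, for any strictly increasing cover of the keys
theorem pv_sorted_blocks {α : Type} (k : α → Int) (D : List α) :
    ∀ (ks : List Int), ks.Pairwise (· < ·) → (∀ x ∈ D, k x ∈ ks) →
      PySem.List.sorted D k false = ks.flatMap (fun v => D.filter (fun x => decide (k x = v))) := by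
  induction D using List.reverseRecOn with
  | nil => simp [PySem.List.sorted_eq_foldl_insertBy]
  | append_singleton D x ih =>
      intro ks hks hcov
      have hx : k x ∈ ks := hcov x (by simp)
      obtain ⟨ks1, ks2, hsplit⟩ := List.append_of_mem hx
      have hcov' : ∀ y ∈ D, k y ∈ ks := fun y hy => hcov y (by simp [hy])
      have hlt1 : ∀ a ∈ ks1, a < k x := by
        intro a ha
        exact (List.pairwise_append.mp (hsplit ▸ hks)).2.2 a ha (k x) (by simp)
      have hlt2 : ∀ b ∈ ks2, k x < b := by
        have := (List.pairwise_append.mp (hsplit ▸ hks)).2.1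
        intro b hb
        exact (List.pairwise_cons.mp this).1 b hb
      have hL : PySem.List.sorted (D ++ [x]) k false
          = PySem.List.insertBy (fun a b => decide (k a < k b)) x (PySem.List.sorted D k false) := by
        rw [PySem.List.sorted_eq_foldl_insertBy, PySem.List.sorted_eq_foldl_insertBy,
          List.foldl_append, List.foldl_cons, List.foldl_nil]
      rw [hL, ih ks hks hcov', hsplit]
      have hblocks : ∀ v (y : α), y ∈ D.filter (fun x => decide (k x = v)) → k y = v := by
        intro v y hy
        simpa using (List.mem_filter.mp hy).2
      rw [List.flatMap_append, List.flatMap_cons]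
      rw [show (ks1.flatMap fun v => D.filter fun x_1 => decide (k x_1 = v)) ++
            ((D.filter fun x_1 => decide (k x_1 = k x)) ++ ks2.flatMap fun v => D.filter fun x_1 => decide (k x_1 = v))
          = ((ks1.flatMap fun v => D.filter fun x_1 => decide (k x_1 = v)) ++ (D.filter fun x_1 => decide (k x_1 = k x))) ++
            ks2.flatMap fun v => D.filter fun x_1 => decide (k x_1 = v) by simp]
      rw [pv_insertBy_middle]
      · rw [List.flatMap_append, List.flatMap_cons]
        have h1 : ∀ v ∈ ks1, (D ++ [x]).filter (fun y => decide (k y = v)) = D.filter (fun y => decide (k y = v)) := by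
          intro v hv
          rw [List.filter_append]
          have : k x ≠ v := by have := hlt1 v hv; omega
          simp [this]
        have h2 : ∀ v ∈ ks2, (D ++ [x]).filter (fun y => decide (k y = v)) = D.filter (fun y => decide (k y = v)) := by
          intro v hv
          rw [List.filter_append]
          have : k x ≠ v := by have := hlt2 v hv; omega
          simp [this]
        rw [List.flatMap_congr h1, List.flatMap_congr h2]
        rw [List.filter_append]
        simp
      · intro y hy
        rcases List.mem_append.mp hy with h | h
        · obtain ⟨v, hv, hyv⟩ := List.mem_flatMap.mp h
          have := hblocks v y hyv
          have := hlt1 v hv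
          simp; omega
        · have := hblocks (k x) y h
          simp; omega
      · intro y hy
        obtain ⟨v, hv, hyv⟩ := List.mem_flatMap.mp hy
        have := hblocks v y hyv
        have := hlt2 v hv
        simp; omega

-- the idxOf-blocks of a duplicate-free list, concatenated, are a filter of P
theorem pv_flatMap_range_idxOf {α : Type} [BEq α] [LawfulBEq α] (P : List α) (hP : P.Nodup)
    (D : List α) (hD : D.Nodup) :
    (List.range P.length).flatMap (fun i => D.filter (fun c => List.idxOf c P == i))
      = P.filter (fun c => decide (c ∈ D)) := by
  induction P using List.reverseRecOn with
  | nil => simp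
  | append_singleton P a ih =>
      have hPn : P.Nodup := (List.nodup_append.mp hP).1
      have haP : a ∉ P := by
        have h := (List.nodup_append.mp hP).2.2
        intro hm
        exact h a hm a (List.mem_singleton_self a) rfl
      have hlen : (P ++ [a]).length = P.length + 1 := by simp
      rw [hlen, List.range_succ, List.flatMap_append, List.flatMap_cons, List.flatMap_nil,
        List.append_nil]
      have hfront : ∀ i ∈ List.range P.length,
          D.filter (fun c => List.idxOf c (P ++ [a]) == i) = D.filter (fun c => List.idxOf c P == i) := by
        intro i hi
        have hi' : i < P.length := List.mem_range.mp hi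
        apply List.filter_congr
        intro c _
        rw [List.idxOf_append]
        by_cases hc : c ∈ P
        · simp [hc]
        · have h1 : List.idxOf c P = P.length := List.idxOf_eq_length_iff.mpr hc
          simp only [hc, ite_false]
          have h2 : ¬ (List.idxOf c [a] + P.length = i) := by omega
          have h3 : ¬ (List.idxOf c P = i) := by omega
          simp [h2, h3]
      have hlast : D.filter (fun c => List.idxOf c (P ++ [a]) == P.length)
          = D.filter (fun c => c == a) := by
        apply List.filter_congr
        intro c _
        rw [List.idxOf_append]
        by_cases hc : c ∈ P
        · have h1 : List.idxOf c P < P.length := List.idxOf_lt_length_of_mem hc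
          have h2 : ¬ (List.idxOf c P = P.length) := by omega
          have h3 : ¬ (c = a) := fun h => haP (h ▸ hc)
          simp [hc, h2, h3]
        · by_cases hca : c = a
          · subst hca
            simp [hc]
          · simp [hc, hca]
      rw [List.flatMap_congr hfront, ih hPn, hlast, pv_filter_eq_of_nodup hD a,
        List.filter_append]
      by_cases haD : a ∈ D <;> simp [haD]

-- the rank dict built by B's loop: size and lookups
theorem pv_rank_spec {α : Type} [BEq α] [LawfulBEq α] [DecidableEq α] (l : List α) :
    (l.foldl (fun d c => if (PySem.Dict.contains d c : Bool) then d
        else d.insert c ((PySem.Dict.size d : Nat) : Int)) (PySem.Dict.empty : PySem.Dict α Int)).size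
        = (PySem.List.dedup l).length
    ∧ ∀ c, (l.foldl (fun d c => if (PySem.Dict.contains d c : Bool) then d
        else d.insert c ((PySem.Dict.size d : Nat) : Int)) (PySem.Dict.empty : PySem.Dict α Int)).get? c
        = if c ∈ l then some ((List.idxOf c (PySem.List.dedup l) : Nat) : Int) else none := by
  induction l using List.reverseRecOn with
  | nil =>
      constructor
      · simp [PySem.List.dedup, PySem.Set.ofList_eq_foldl, PySem.Dict.size_empty]
      · intro c; simp [PySem.Dict.get?_empty]
  | append_singleton l b ih =>
      obtain ⟨ihsize, ihget⟩ := ih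
      rw [List.foldl_append, List.foldl_cons, List.foldl_nil]
      set d := l.foldl (fun d c => if (PySem.Dict.contains d c : Bool) then d
        else d.insert c ((PySem.Dict.size d : Nat) : Int)) (PySem.Dict.empty : PySem.Dict α Int) with hd
      have hcont : (d.contains b : Bool) = decide (b ∈ l) := by
        rw [PySem.Dict.contains_eq_isSome_get?, ihget b]
        by_cases h : b ∈ l <;> simp [h]
      by_cases hb : b ∈ l
      · rw [hcont]
        simp only [hb, decide_true, if_true]
        rw [pv_dedup_snoc]
        simp only [hb, if_pos]
        refine ⟨ihsize, fun c => ?_⟩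
        rw [ihget c]
        by_cases hc : c ∈ l
        · simp [hc, List.mem_append]
        · simp [hc, List.mem_append]
          intro h; exact absurd (h ▸ hb) hc
      · rw [hcont]
        simp only [hb, decide_false, Bool.false_eq_true, if_false]
        rw [pv_dedup_snoc]
        simp only [hb, ite_false]
        constructor
        · rw [PySem.Dict.size_insert, hcont]
          simp [hb, ihsize]
        · intro c
          rw [PySem.Dict.get?_insert, ihget c]
          by_cases hcb : c = b
          · subst hcb
            simp [hb, List.idxOf_append, ihsize]
          · by_cases hc : c ∈ l
            · simp [hcb, hc, List.idxOf_append]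
            · have : ¬ c ∈ l ++ [b] := by simp [hc, hcb]
              simp [hcb, hc, this]

-- B's stable sort, in split normal form
theorem pv_B_normal {α : Type} [BEq α] [LawfulBEq α] (P0 dd : List α) (hdd : dd.Nodup) :
    PySem.List.sorted dd (fun c => ((List.idxOf c (PySem.List.dedup P0) : Nat) : Int)) false
      = (PySem.List.dedup P0).filter (fun c => decide (c ∈ dd))
        ++ dd.filter (fun c => !(decide (c ∈ PySem.List.dedup P0))) := by
  set P := PySem.List.dedup P0 with hPdef
  have hP : P.Nodup := PySem.List.nodup_dedup P0
  have hsb := pv_sorted_blocks (fun c => ((List.idxOf c P : Nat) : Int)) dd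
    (PySem.List.pyRange 0 ((P.length : Int) + 1) 1)
    (PySem.List.pairwise_lt_pyRange_one 0 ((P.length : Int) + 1))
    (by
      intro x _
      rw [PySem.List.mem_pyRange_one]
      constructor
      · positivity
      · have := List.idxOf_le_length (l := P) (a := x)
        push_cast
        omega)
  rw [hsb, PySem.List.pyRange_one]
  have hn : ((P.length : Int) + 1 - 0).toNat = P.length + 1 := by omega
  rw [hn, List.flatMap_map]
  have hblocks : ∀ i ∈ List.range (P.length + 1),
      dd.filter (fun c => decide (((List.idxOf c P : Nat) : Int) = 0 + (i : Int)))
        = dd.filter (fun c => List.idxOf c P == i) := by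
    intro i _
    apply List.filter_congr
    intro c _
    by_cases h : List.idxOf c P = i
    · simp [h]
    · simp [h]
  rw [List.flatMap_congr hblocks, List.range_succ, List.flatMap_append, List.flatMap_cons,
    List.flatMap_nil, List.append_nil, pv_flatMap_range_idxOf P hP dd hdd]
  congr 1
  apply List.filter_congr
  intro c _
  by_cases h : c ∈ P
  · have := List.idxOf_lt_length_of_mem h
    have h2 : ¬ (List.idxOf c P = P.length) := by omega
    simp [h, h2]
  · simp [h]

-- A's priority phase equals a filter of the deduplicated priority list
theorem pv_A_priority {α : Type} [BEq α] [LawfulBEq α] (z : α) (W cs : List α) :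
    (if z ∈ cs then [z] else []) ++
        (PySem.List.dedup (W.filter (fun b => decide (b ∈ cs)))).filter
          (fun b => !((if z ∈ cs then ([z] : List α) else []).contains b))
      = (PySem.List.dedup (z :: W)).filter (fun b => decide (b ∈ cs)) := by
  rw [pv_dedup_cons, pv_dedup_filter]
  by_cases hz : z ∈ cs
  · rw [if_pos hz, List.filter_cons]
    simp only [hz, decide_true, if_true, List.cons_append, List.nil_append]
    congr 1
    rw [List.filter_filter, List.filter_filter]
    apply List.filter_congr
    intro b _
    by_cases hbz : b = z
    · subst hbz; simp
    · simp [hbz]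
  · rw [if_neg hz, List.filter_cons]
    simp only [hz, decide_false, List.nil_append, Bool.false_eq_true, if_false]
    rw [List.filter_filter, List.filter_filter]
    apply List.filter_congr
    intro b _
    by_cases hbz : b = z
    · subst hbz; simp [hz]
    · simp [hbz]


-- membership in set(xs)
theorem pv_contains_ofList {α : Type} [BEq α] [LawfulBEq α] (l : List α) (x : α) :
    PySem.Set.contains (PySem.Set.ofList l) x = decide (x ∈ l) := by
  by_cases h : x ∈ l <;> simp [PySem.Set.contains, PySem.Set.mem_ofList, h]

-- A's last loop is an ordered dedup of the remaining codes
theorem pv_foldl_dedup {α : Type} [BEq α] [LawfulBEq α] (l o : List α) :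
    l.foldl (fun order c => if !(order.contains c) then order ++ [c] else order) o
      = o ++ (PySem.List.dedup l).filter (fun b => !(o.contains b)) := by
  have h := pv_foldl_guard (fun _ => true) l o
  simpa using h

-- ===== VERDICT (by name: the statement is the Claim_ definition above) =====
theorem infer_basis_order_py_spec : Claim_equal_infer_basis_order_py := by
  intro cs n _
  unfold Spec_infer_basis_order_py
  simp only [infer_basis_order_py, infer_basis_order_py_alt, List.foldl_cons, List.foldl_nil]
  rw [← List.foldl_append]
  rw [pv_foldl_guard (fun b => PySem.Set.contains (PySem.Set.ofList cs) b)]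
  rw [pv_foldl_dedup]
  simp only [pv_contains_ofList, decide_eq_true_eq, List.nil_append]
  rw [pv_A_priority]
  simp only [List.cons_append, List.nil_append]
  set z := String.ofList (PySem.List.pyRepeat ['Z'] n) with hz
  set W := pv_sliding_window_bases ["X", "X"] n "Z" ++ pv_sliding_window_bases ["X", "Y"] n "Z" with hW
  have hddn : (PySem.List.dedup cs).Nodup := PySem.List.nodup_dedup cs
  have hkey : (fun c => (List.foldl (fun rank c => if rank.contains c then rank
          else rank.insert c ((rank.size : Nat) : Int)) PySem.Dict.empty (z :: W)).getD c
        (((List.foldl (fun rank c => if rank.contains c then rank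
          else rank.insert c ((rank.size : Nat) : Int)) PySem.Dict.empty (z :: W)).size : Nat) : Int))
      = fun c => ((List.idxOf c (PySem.List.dedup (z :: W)) : Nat) : Int) := by
    funext c
    rw [PySem.Dict.getD_eq_get?_getD, (pv_rank_spec (z :: W)).2 c, (pv_rank_spec (z :: W)).1]
    by_cases hc : c ∈ z :: W
    · simp [hc]
    · have hcp : c ∉ PySem.List.dedup (z :: W) := by
        simpa [PySem.List.mem_dedup] using hc
      simp [hc]
  rw [hkey, pv_B_normal (z :: W) (PySem.List.dedup cs) hddn]
  congr 1
  · apply List.filter_congr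
    intro c _
    simp
  · apply List.filter_congr
    intro c hc
    have hccs : c ∈ cs := by simpa [PySem.List.mem_dedup] using hc
    congr 1
    by_cases hpc : c ∈ PySem.List.dedup (z :: W)
    · simp [List.mem_filter, hccs]
    · simp [List.mem_filter]
      exact fun _ => hccs
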